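-- pv_equiv track=rewrite | github.com/georgri/advent-of-code | AdventOfCode2022/19.py | build_robot
-- ===== SOURCE A (Python) =====
-- def unbuild_robot(cost, robots, resources, kind):
--     if kind == -1:
--         return
--
--     for j in range(len(cost)):
--         resources[j] += cost[j]
--
--     robots[kind] -= 1
--
-- def build_robot(cost, robots, resources, kind):
--     if kind == -1:
--         return True
--
--     robots[kind] += 1
--
--     possible = True
--
--     for j in range(len(cost)):
--         resources[j] -= cost[j]
--         if resources[j] < 0:
--             possible = False
--
--     if not possible: # возвращаем назад
--         unbuild_robot(cost, robots, resources, kind)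
--
--     return possible
-- ===== SOURCE B (Python) =====
-- def build_robot(cost, robots, resources, kind):
--     # Check-then-commit: test affordability first, mutate only on success.
--     # (A mutates optimistically and rolls back; net effect on success is the same.)
--     if kind == -1:
--         return True
--     if not all(cost[j] <= resources[j] for j in range(len(cost))):
--         return False
--     robots[kind] += 1
--     for j in range(len(cost)):
--         resources[j] -= cost[j]
--     return True
-- ===== Notes on version B (the rewrite author's own statement) =====
-- stated objective: simpler
-- what changed: Replaces A's optimistic mutate-then-rollback (increment robots, subtract all costs, then call unbuild_robot to undo on failure) with a check-then-commit decomposition: an all() affordability test first, mutation only on success, which also skips the subtract-and-rollback double pass on unaffordable inputs.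
import Mathlib
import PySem

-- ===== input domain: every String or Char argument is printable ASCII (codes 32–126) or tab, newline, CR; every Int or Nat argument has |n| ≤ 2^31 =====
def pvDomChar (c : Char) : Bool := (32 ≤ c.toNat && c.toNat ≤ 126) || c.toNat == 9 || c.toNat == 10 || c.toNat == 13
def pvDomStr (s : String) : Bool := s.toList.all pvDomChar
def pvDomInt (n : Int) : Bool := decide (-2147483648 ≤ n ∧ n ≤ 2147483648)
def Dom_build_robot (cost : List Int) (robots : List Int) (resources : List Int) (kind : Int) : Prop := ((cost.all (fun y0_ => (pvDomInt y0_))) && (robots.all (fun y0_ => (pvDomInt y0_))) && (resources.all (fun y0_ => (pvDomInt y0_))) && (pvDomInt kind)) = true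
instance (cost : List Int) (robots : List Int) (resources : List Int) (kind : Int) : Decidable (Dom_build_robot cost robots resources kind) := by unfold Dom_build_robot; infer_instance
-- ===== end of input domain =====

-- B replaces A's mutate-then-rollback with a check-then-commit decomposition (objective: simpler).
-- A and B mutate robots/resources in place; the equivalence proved here is about the RETURN value
-- (on success the net mutation also coincides; on failure A rolls back, B never touches them).

-- ===== PORT A =====
-- one iteration of A's loop body: resources[j] -= cost[j]; if resources[j] < 0: possible = False
def pvStepA (cost : List Int) (st : List Int × Bool) (j : Nat) : List Int × Bool :=
  let res := st.1.set j (st.1.getD j 0 - cost.getD j 0)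
  (res, if res.getD j 0 < 0 then false else st.2)

def build_robot (cost : List Int) (robots : List Int) (resources : List Int) (kind : Int) : Bool :=
  if kind == -1 then true
  else
    -- robots[kind] += 1 affects only the mutated list, not the return value
    let st := (List.range cost.length).foldl (pvStepA cost) (resources, true)
    -- (the rollback via unbuild_robot likewise only restores the mutated lists)
    st.2

-- ===== PORT B =====
def build_robot_alt (cost : List Int) (robots : List Int) (resources : List Int) (kind : Int) : Bool :=
  if kind == -1 then true
  else if (List.range cost.length).all (fun j => cost.getD j 0 ≤ resources.getD j 0) then
    -- commit pass mutates robots/resources only; return value is True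
    true
  else false

-- ===== PRECONDITION & SPEC =====
-- Exactly where the Python A returns: kind = -1, or kind a valid (possibly negative) index
-- into robots and resources at least as long as cost (else IndexError in A's loop).
def Pre_build_robot (cost : List Int) (robots : List Int) (resources : List Int) (kind : Int) : Prop :=
  kind = -1 ∨ (PySem.Raise.InRange robots.length kind ∧ cost.length ≤ resources.length)
instance (cost : List Int) (robots : List Int) (resources : List Int) (kind : Int) : Decidable (Pre_build_robot cost robots resources kind) := by unfold Pre_build_robot; infer_instance

def pvWitness_build_robot : List Int × List Int × List Int × Int := ([2, 1], [0, 0], [3, 1], 1)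

def Spec_build_robot (cost : List Int) (robots : List Int) (resources : List Int) (kind : Int) (out : Bool) : Prop := out = build_robot_alt cost robots resources kind
instance (cost : List Int) (robots : List Int) (resources : List Int) (kind : Int) (out : Bool) : Decidable (Spec_build_robot cost robots resources kind out) := by unfold Spec_build_robot; infer_instance

-- ===== CLAIM (what is proved, stated in full; the proofs are below) =====
def Claim_equal_build_robot : Prop := ∀ (cost : List Int) (robots : List Int) (resources : List Int) (kind : Int), Dom_build_robot cost robots resources kind → Pre_build_robot cost robots resources kind → Spec_build_robot cost robots resources kind (build_robot cost robots resources kind)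

-- ===== LEMMAS AND PROOFS =====

-- Invariant of A's loop over range n (n ≤ resources.length): the resource list keeps its
-- length, is unchanged at indices ≥ n, and the flag equals B's affordability test over range n.
theorem pvLoopA_inv (cost resources : List Int) (n : Nat) (hn : n ≤ resources.length) :
    ((List.range n).foldl (pvStepA cost) (resources, true)).1.length = resources.length ∧
    (∀ k, n ≤ k → ((List.range n).foldl (pvStepA cost) (resources, true)).1.getD k 0 = resources.getD k 0) ∧
    ((List.range n).foldl (pvStepA cost) (resources, true)).2
      = (List.range n).all (fun j => cost.getD j 0 ≤ resources.getD j 0) := by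
  induction n with
  | zero => simp
  | succ n ih =>
    obtain ⟨hlen, hup, hflag⟩ := ih (Nat.le_of_succ_le hn)
    rw [List.range_succ, List.foldl_append, List.all_append]
    set st := (List.range n).foldl (pvStepA cost) (resources, true) with hst
    have hn' : n < resources.length := hn
    have hres : (pvStepA cost st n).1.getD n 0 = resources.getD n 0 - cost.getD n 0 := by
      have h1 : n < st.1.length := by omega
      have h2 := hup n le_rfl
      simp only [pvStepA, List.getD_eq_getElem?_getD, List.getElem?_set_self h1]
      rw [List.getD_eq_getElem?_getD] at h2
      simp [h2]
    refine ⟨?_, ?_, ?_⟩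
    · simp [pvStepA, hlen]
    · intro k hk
      simp only [List.foldl_cons, List.foldl_nil, pvStepA,
        List.getD_eq_getElem?_getD, List.getElem?_set_ne (by omega : n ≠ k)]
      have := hup k (by omega)
      simpa [List.getD_eq_getElem?_getD] using this
    · simp only [List.foldl_cons, List.foldl_nil]
      have hstep : (pvStepA cost st n).2 = if (pvStepA cost st n).1.getD n 0 < 0 then false else st.2 := rfl
      rw [hstep, hres, hflag]
      by_cases h : cost.getD n 0 ≤ resources.getD n 0
      · rw [if_neg (by omega)]
        have h' : cost[n]?.getD 0 ≤ resources[n]?.getD 0 := by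
          simp only [← List.getD_eq_getElem?_getD]; omega
        simp [h']
      · rw [if_pos (by omega)]
        have h' : resources[n]?.getD 0 < cost[n]?.getD 0 := by
          simp only [← List.getD_eq_getElem?_getD]; omega
        simp [h']

-- ===== VERDICT (by name: the statement is the Claim_ definition above) =====
theorem build_robot_spec : Claim_equal_build_robot := by
  intro cost robots resources kind _ hpre
  unfold Spec_build_robot
  by_cases hk : kind = -1
  · simp [build_robot, build_robot_alt, hk]
  · have hlen : cost.length ≤ resources.length := by
      rcases hpre with h | ⟨_, h⟩
      · exact absurd h hk
      · exact h
    have hA : build_robot cost robots resources kind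
        = (List.range cost.length).all (fun j => decide (cost.getD j 0 ≤ resources.getD j 0)) := by
      simp [build_robot, hk, (pvLoopA_inv cost resources cost.length hlen).2.2]
    have hB : build_robot_alt cost robots resources kind
        = (List.range cost.length).all (fun j => decide (cost.getD j 0 ≤ resources.getD j 0)) := by
      simp only [build_robot_alt, beq_iff_eq, hk, if_false]
      split
      · simp_all
      · rename_i hex
        exact (Bool.eq_false_iff.mpr hex).symm
    rw [hA, hB]
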